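-- pv_equiv track=rewrite | github.com/LaviBenshimol/genai-ocr-chatbot | services/chat-service/app/services/grounded_answerer.py | format_kb_context_for_llm
-- ===== SOURCE A (Python) =====
-- from typing import Dict, List, Any
--
-- def format_kb_context_for_llm(snippets: List[Dict[str, Any]]) -> str:
--     """Format KB snippets into readable context for the LLM."""
--     if not snippets:
--         return "אין מידע זמין במערכת."
--
--     formatted_sections = []
--     current_category = None
--
--     for snippet in snippets:
--         category = snippet.get('category', '')
--         service = snippet.get('service', '')
--         fund = snippet.get('fund', '')
--         plan = snippet.get('plan', '')
--         text = snippet.get('text', '')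
--         source_file = snippet.get('source_file', '')
--
--         # Group by category
--         if category != current_category:
--             if current_category:
--                 formatted_sections.append("")  # Add spacing between categories
--             formatted_sections.append(f"## {category}")
--             current_category = category
--
--         # Add service info
--         formatted_sections.append(f"**{service}** - {fund} {plan}:")
--         formatted_sections.append(f"  {text} [מקור: {source_file}]")
--
--     return "\n".join(formatted_sections)
-- ===== SOURCE B (Python) =====
-- def format_kb_context_for_llm(snippets):
--     """Format KB snippets into readable context for the LLM (group first, then render)."""
--     if not snippets:
--         return "אין מידע זמין במערכת."
--
--     # Phase 1: bucket consecutive snippets sharing a category into groups.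
--     groups = []
--     for s in snippets:
--         c = s.get('category', '')
--         if groups and groups[-1][0] == c:
--             groups[-1][1].append(s)
--         else:
--             groups.append((c, [s]))
--
--     # Phase 2: render the groups.
--     lines = []
--     prev = None
--     for cat, members in groups:
--         if prev:
--             lines.append("")
--         lines.append(f"## {cat}")
--         for s in members:
--             lines.append(f"**{s.get('service', '')}** - {s.get('fund', '')} {s.get('plan', '')}:")
--             lines.append(f"  {s.get('text', '')} [מקור: {s.get('source_file', '')}]")
--         prev = cat
--     return "\n".join(lines)
-- ===== Notes on version B (the rewrite author's own statement) =====
-- stated objective: alternative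
-- what changed: Replaces A's single stateful pass (current_category sentinel deciding headers inline) with a two-phase pipeline: first bucket consecutive snippets into (category, members) groups, then render the groups with a nested loop.
import Mathlib
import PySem

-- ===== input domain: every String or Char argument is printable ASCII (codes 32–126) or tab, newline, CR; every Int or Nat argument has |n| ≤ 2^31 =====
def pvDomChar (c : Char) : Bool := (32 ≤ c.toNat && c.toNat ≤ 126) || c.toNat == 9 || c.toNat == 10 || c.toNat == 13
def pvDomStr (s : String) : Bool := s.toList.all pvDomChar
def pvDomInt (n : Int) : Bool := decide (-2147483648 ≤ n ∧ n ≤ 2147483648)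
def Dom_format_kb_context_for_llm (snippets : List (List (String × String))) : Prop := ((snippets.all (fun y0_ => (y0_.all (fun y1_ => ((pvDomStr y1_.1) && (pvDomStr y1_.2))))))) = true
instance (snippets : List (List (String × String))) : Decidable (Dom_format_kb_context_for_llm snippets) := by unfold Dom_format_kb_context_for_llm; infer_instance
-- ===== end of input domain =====

-- B groups consecutive snippets by category first and then renders the groups in a nested loop,
-- replacing A's single stateful pass; equivalence of the two renderings is proved on Dom.


-- shared tiny helpers: snippet.get(k, '') and Python truthiness of an Optional[str]
def pvSGet (s : List (String × String)) (k : String) : String :=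
  (PySem.Dict.ofList s).getD k ""

def pvTruthy : Option String → Bool
  | none => false
  | some c => c ≠ ""

def pvLine1 (s : List (String × String)) : String :=
  "**" ++ pvSGet s "service" ++ "** - " ++ pvSGet s "fund" ++ " " ++ pvSGet s "plan" ++ ":"

def pvLine2 (s : List (String × String)) : String :=
  "  " ++ pvSGet s "text" ++ " [מקור: " ++ pvSGet s "source_file" ++ "]"

-- ===== PORT A =====
-- one pass; state = (formatted_sections, current_category)
def pvStepA (st : List String × Option String) (s : List (String × String)) :
    List String × Option String :=
  let category := pvSGet s "category"
  let st1 : List String × Option String :=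
    if st.2 ≠ some category then
      (st.1 ++ (if pvTruthy st.2 then [""] else []) ++ ["## " ++ category], some category)
    else st
  (st1.1 ++ [pvLine1 s, pvLine2 s], st1.2)

def format_kb_context_for_llm (snippets : List (List (String × String))) : String :=
  if snippets = [] then "אין מידע זמין במערכת."
  else PySem.Str.join "\n" (snippets.foldl pvStepA ([], none)).1

-- ===== PORT B =====
-- phase 1: bucket consecutive snippets with equal category into groups
def pvStepGroup (gs : List (String × List (List (String × String))))
    (s : List (String × String)) : List (String × List (List (String × String))) :=
  let c := pvSGet s "category"
  match gs.getLast? with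
  | some (k, ms) => if k = c then gs.dropLast ++ [(k, ms ++ [s])] else gs ++ [(c, [s])]
  | none => gs ++ [(c, [s])]

-- phase 2: render one group (blank separator, header, then the members)
def pvStepRender (st : List String × Option String)
    (g : String × List (List (String × String))) : List String × Option String :=
  (g.2.foldl (fun ls s => ls ++ [pvLine1 s, pvLine2 s])
      (st.1 ++ (if pvTruthy st.2 then [""] else []) ++ ["## " ++ g.1]),
   some g.1)

def format_kb_context_for_llm_alt (snippets : List (List (String × String))) : String :=
  if snippets = [] then "אין מידע זמין במערכת."
  else
    let groups := snippets.foldl pvStepGroup []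
    PySem.Str.join "\n" (groups.foldl pvStepRender ([], none)).1

-- ===== PRECONDITION & SPEC =====
def Spec_format_kb_context_for_llm (snippets : List (List (String × String))) (out : String) : Prop := out = format_kb_context_for_llm_alt snippets
instance (snippets : List (List (String × String))) (out : String) : Decidable (Spec_format_kb_context_for_llm snippets out) := by unfold Spec_format_kb_context_for_llm; infer_instance

-- ===== CLAIM (what is proved, stated in full; the proofs are below) =====
def Claim_equal_format_kb_context_for_llm : Prop := ∀ (snippets : List (List (String × String))), Dom_format_kb_context_for_llm snippets → Spec_format_kb_context_for_llm snippets (format_kb_context_for_llm snippets)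

-- ===== LEMMAS AND PROOFS =====

-- the lines A emits starting from current_category = cur
def pvLinesA (cur : Option String) : List (List (String × String)) → List String
  | [] => []
  | s :: rest =>
    let c := pvSGet s "category"
    (if cur ≠ some c then (if pvTruthy cur then [""] else []) ++ ["## " ++ c] else [])
      ++ [pvLine1 s, pvLine2 s] ++ pvLinesA (some c) rest

def pvEntries (ms : List (List (String × String))) : List String :=
  ms.flatMap (fun s => [pvLine1 s, pvLine2 s])

-- the groups B builds once its accumulator ends in an open group (k, ms)
def pvGrp (k : String) (ms : List (List (String × String))) :
    List (List (String × String)) → List (String × List (List (String × String)))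
  | [] => [(k, ms)]
  | s :: rest =>
    let c := pvSGet s "category"
    if c = k then pvGrp k (ms ++ [s]) rest else (k, ms) :: pvGrp c [s] rest

-- the lines B emits from a group list, starting with prev = pk
def pvLinesB (pk : Option String) : List (String × List (List (String × String))) → List String
  | [] => []
  | (k, ms) :: gs =>
    (if pvTruthy pk then [""] else []) ++ ["## " ++ k] ++ pvEntries ms ++ pvLinesB (some k) gs

theorem pvFoldA_eq (sn : List (List (String × String))) :
    ∀ (acc : List String) (cur : Option String),
      (sn.foldl pvStepA (acc, cur)).1 = acc ++ pvLinesA cur sn := by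
  induction sn with
  | nil => intro acc cur; simp [pvLinesA]
  | cons s rest ih =>
    intro acc cur
    simp only [List.foldl_cons, pvStepA, pvLinesA]
    by_cases h : cur = some (pvSGet s "category")
    · simp [h, ih, List.append_assoc]
    · simp [h, ih, List.append_assoc]

theorem pvFoldG_eq (sn : List (List (String × String))) :
    ∀ (gs : List (String × List (List (String × String)))) (k : String)
      (ms : List (List (String × String))),
      (sn.foldl pvStepGroup (gs ++ [(k, ms)])) = gs ++ pvGrp k ms sn := by
  induction sn with
  | nil => intro gs k ms; simp [pvGrp]
  | cons s rest ih =>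
    intro gs k ms
    simp only [List.foldl_cons, pvStepGroup, pvGrp]
    rw [List.getLast?_concat]
    by_cases h : k = pvSGet s "category"
    · simp [h, ih]
    · have h' : ¬ pvSGet s "category" = k := fun e => h e.symm
      simp only [h, if_false, h', List.append_assoc]
      rw [show gs ++ ([(k, ms)] ++ [(pvSGet s "category", [s])])
            = (gs ++ [(k, ms)]) ++ [(pvSGet s "category", [s])] by simp,
          ih]
      simp

theorem pvFoldE_eq (ms : List (List (String × String))) :
    ∀ (acc : List String),
      ms.foldl (fun ls s => ls ++ [pvLine1 s, pvLine2 s]) acc = acc ++ pvEntries ms := by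
  induction ms with
  | nil => intro acc; simp [pvEntries]
  | cons s rest ih => intro acc; simp [pvEntries, ih, List.append_assoc]

theorem pvFoldR_eq (gs : List (String × List (List (String × String)))) :
    ∀ (acc : List String) (pk : Option String),
      (gs.foldl pvStepRender (acc, pk)).1 = acc ++ pvLinesB pk gs := by
  induction gs with
  | nil => intro acc pk; simp [pvLinesB]
  | cons g rest ih =>
    intro acc pk
    obtain ⟨k, ms⟩ := g
    simp only [List.foldl_cons, pvStepRender, pvLinesB]
    rw [pvFoldE_eq, ih]
    simp [List.append_assoc]

theorem pvEntries_concat (ms : List (List (String × String))) (s : List (String × String)) :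
    pvEntries (ms ++ [s]) = pvEntries ms ++ [pvLine1 s, pvLine2 s] := by
  simp [pvEntries]

theorem pvLinesB_grp (rest : List (List (String × String))) :
    ∀ (k : String) (ms : List (List (String × String))) (pk : Option String),
      pvLinesB pk (pvGrp k ms rest)
        = (if pvTruthy pk then [""] else []) ++ ["## " ++ k] ++ pvEntries ms
            ++ pvLinesA (some k) rest := by
  induction rest with
  | nil => intro k ms pk; simp [pvGrp, pvLinesB, pvLinesA]
  | cons s rs ih =>
    intro k ms pk
    by_cases h : pvSGet s "category" = k
    · rw [show pvGrp k ms (s :: rs) = pvGrp k (ms ++ [s]) rs from by simp [pvGrp, h], ih]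
      simp [pvLinesA, h, pvEntries_concat, List.append_assoc]
    · rw [show pvGrp k ms (s :: rs) = (k, ms) :: pvGrp (pvSGet s "category") [s] rs from by
        simp [pvGrp, h]]
      simp only [pvLinesB]
      rw [ih]
      have hne : (some k : Option String) ≠ some (pvSGet s "category") := by
        intro e; exact h (Option.some.inj e).symm
      simp [pvLinesA, hne, pvEntries, List.append_assoc]

theorem pvLines_eq (s : List (String × String)) (rest : List (List (String × String))) :
    pvLinesB none ((s :: rest).foldl pvStepGroup [])
      = pvLinesA none (s :: rest) := by
  have h0 : (s :: rest).foldl pvStepGroup []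
      = pvGrp (pvSGet s "category") [s] rest := by
    have := pvFoldG_eq rest [] (pvSGet s "category") [s]
    simpa [pvStepGroup] using this
  rw [h0, pvLinesB_grp]
  simp [pvLinesA, pvTruthy, pvEntries]

-- ===== VERDICT (by name: the statement is the Claim_ definition above) =====
theorem format_kb_context_for_llm_spec : Claim_equal_format_kb_context_for_llm := by
  intro snippets _
  unfold Spec_format_kb_context_for_llm format_kb_context_for_llm format_kb_context_for_llm_alt
  cases snippets with
  | nil => simp
  | cons s rest =>
    simp only [if_neg (List.cons_ne_nil s rest)]
    rw [pvFoldA_eq, pvFoldR_eq, pvLines_eq]
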